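-- pv_equiv track=rewrite | github.com/jaehyeonkim2358/W02_teamB7 | 2504/2504_lkw.py | f
-- ===== SOURCE A (Python) =====
-- def f(p):
--     if len(p) == 0 :return 1
--
--     dic = {'(':')', '[':']'}
--     ans, sub, stk = 0, '', []
--
--     for i in p:
--         sub += i
--
--         if len(stk) > 0 and dic.get(stk[-1], '') == i:
--             stk.pop()
--         else :
--             stk.append(i)
--
--         if len(stk) == 0:
--             ans = ans + f(sub[1:-1]) * (2 if sub[0] == '(' else 3)
--             sub= ''
--
--     if len(stk) > 0 :
--         return 0
--
--     return ans
-- ===== SOURCE B (Python) =====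
-- def f(p):
--     # Single pass: stack of (saved_total, opening_char); cur = sum of values of
--     # completed groups at the current depth.
--     stack = []
--     cur = 0
--     for c in p:
--         if c == '(' or c == '[':
--             stack.append((cur, c))
--             cur = 0
--         elif c == ')' or c == ']':
--             if not stack:
--                 return 0
--             saved, o = stack.pop()
--             if (o == '(') != (c == ')'):
--                 return 0
--             cur = saved + (cur if cur else 1) * (2 if c == ')' else 3)
--         else:
--             return 0
--     return 0 if stack else cur
-- ===== Notes on version B (the rewrite author's own statement) =====
-- stated objective: faster
-- what changed: A re-parses every balanced group with a recursive call on the group's inner substring (re-scanning it char by char); B is a single left-to-right pass keeping a stack of (saved_sum, opening_bracket) pairs and a running sum per depth, so no character is read twice.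
-- intended difference: On the empty string A returns 1 (its recursion base case leaking to the top level), while B returns 0, the intended value since an empty input contains no brackets to score. — e.g. on f(""): A returns 1, B returns 0
import Mathlib
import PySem

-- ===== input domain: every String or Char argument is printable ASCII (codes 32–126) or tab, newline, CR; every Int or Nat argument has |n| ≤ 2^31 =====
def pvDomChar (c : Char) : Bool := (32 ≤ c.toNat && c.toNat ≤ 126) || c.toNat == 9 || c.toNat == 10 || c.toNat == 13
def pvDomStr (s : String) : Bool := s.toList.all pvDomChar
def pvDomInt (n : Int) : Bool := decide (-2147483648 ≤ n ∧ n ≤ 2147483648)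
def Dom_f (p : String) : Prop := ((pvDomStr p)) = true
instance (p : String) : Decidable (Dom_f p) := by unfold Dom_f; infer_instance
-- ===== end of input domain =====

-- B replaces A's recursive re-parsing of each bracket group by one O(n) pass with a
-- stack of (saved_sum, opening_bracket) pairs; on the empty string A returns 1 and B
-- returns the intended 0 (stated as D_f below).

-- ===== PORT A =====

-- dic.get(t, '') == i : the default '' never equals the one-char string i, so the
-- test holds exactly when dic maps t to i.
def dicGet (t : Char) : Option Char :=
  if t = '(' then some ')' else if t = '[' then some ']' else none

-- A's for-loop: state (ans, sub, stk); Python's stk has its top at the end, here the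
-- top is the head of the list (append/pop at the end ↦ cons/tail at the head).
-- sub[1:-1] on the nonempty sub' is (sub'.drop 1).dropLast; sub[0] is sub'.head?.
def goA (F : List Char → Int) : List Char → Int → List Char → List Char → Int
  | [], ans, _sub, stk => if stk = [] then ans else 0
  | i :: rest, ans, sub, stk =>
    let sub' := sub ++ [i]
    let stk' := match stk with
      | t :: s => if dicGet t = some i then s else i :: t :: s
      | [] => [i]
    if stk' = [] then
      goA F rest (ans + F ((sub'.drop 1).dropLast) * (if sub'.head? = some '(' then 2 else 3)) [] []
    else
      goA F rest ans sub' stk'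

-- A's recursion, driven by a fuel that strictly dominates the argument's length
-- (each recursive call is on sub[1:-1], at least two characters shorter, so the
-- fuel never runs out; the 0-fuel branch is unreachable from f).
def fA : Nat → List Char → Int
  | 0, _ => 0
  | _n + 1, l => if l = [] then 1 else goA (fA _n) l 0 [] []

def f (p : String) : Int := fA (p.toList.length + 1) p.toList

-- ===== PORT B =====

-- Source B's single pass: stack of (saved_total, opening_char), cur = sum of values of
-- the completed groups at the current depth; every `return 0` becomes the value 0.
def goB : List Char → List (Int × Char) → Int → Int
  | [], stk, cur => if stk = [] then cur else 0
  | c :: rest, stk, cur =>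
    if c = '(' ∨ c = '[' then
      goB rest ((cur, c) :: stk) 0
    else if c = ')' ∨ c = ']' then
      match stk with
      | [] => 0
      | (saved, o) :: s =>
        if (o = '(' ↔ c = ')') then
          goB rest s (saved + (if cur = 0 then 1 else cur) * (if c = ')' then 2 else 3))
        else 0
    else 0

def f_alt (p : String) : Int := goB p.toList [] 0

-- ===== PRECONDITION & SPEC =====
-- On the empty string A returns 1 (its recursion base case leaking to the top level)
-- while B returns 0, the intended value: an empty input contains no brackets to score.
def D_f (p : String) : Prop := p = ""
instance (p : String) : Decidable (D_f p) := by unfold D_f; infer_instance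

def Spec_f (p : String) (out : Int) : Prop := ¬ D_f p → out = f_alt p
instance (p : String) (out : Int) : Decidable (Spec_f p out) := by unfold Spec_f; infer_instance

def pvDiffWitness_f : String := ""
def pvDiffWitnessOut_f : Int × Int := (1, 0)

-- ===== CLAIM (what is proved, stated in full; the proofs are below) =====
def Claim_unchanged_f : Prop := ∀ (p : String), Dom_f p → Spec_f p (f p)
def Claim_changed_f : Prop := Dom_f (pvDiffWitness_f) ∧ D_f (pvDiffWitness_f) ∧ f (pvDiffWitness_f) = pvDiffWitnessOut_f.1 ∧ f_alt (pvDiffWitness_f) = pvDiffWitnessOut_f.2 ∧ pvDiffWitnessOut_f.1 ≠ pvDiffWitnessOut_f.2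
def Claim_exact_f : Prop := ∀ (p : String), Dom_f p → D_f p → f p ≠ f_alt p

-- ===== LEMMAS AND PROOFS =====

-- One step of B's loop as an Option-valued transition (none = Source B's `return 0`).
def stepB (stk : List (Int × Char)) (cur : Int) (c : Char) : Option (List (Int × Char) × Int) :=
  if c = '(' ∨ c = '[' then some ((cur, c) :: stk, 0)
  else if c = ')' ∨ c = ']' then
    match stk with
    | [] => none
    | (saved, o) :: s =>
      if (o = '(' ↔ c = ')') then
        some (s, saved + (if cur = 0 then 1 else cur) * (if c = ')' then 2 else 3))
      else none
  else none

def runB : List Char → List (Int × Char) → Int → Option (List (Int × Char) × Int)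
  | [], stk, cur => some (stk, cur)
  | c :: rest, stk, cur =>
    match stepB stk cur c with
    | none => none
    | some (s', cur') => runB rest s' cur'

theorem goB_eq_runB (l : List Char) : ∀ stk cur,
    goB l stk cur = match runB l stk cur with
      | none => 0
      | some (s, x) => if s = [] then x else 0 := by
  induction l with
  | nil => intro stk cur; rfl
  | cons c rest ih =>
    intro stk cur
    simp only [goB, runB, stepB]
    by_cases h1 : c = '(' ∨ c = '['
    · simp [h1, ih]
    · by_cases h2 : c = ')' ∨ c = ']'
      · simp only [h1, h2, if_false, if_true]
        match stk with
        | [] => rfl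
        | (saved, o) :: s =>
          by_cases h3 : (o = '(' ↔ c = ')')
          · simp [h3, ih]
          · simp [h3]
      · simp [h1, h2]

theorem runB_append (u : List Char) : ∀ v stk cur,
    runB (u ++ v) stk cur = match runB u stk cur with
      | none => none
      | some (s, x) => runB v s x := by
  induction u with
  | nil => intro v stk cur; rfl
  | cons c rest ih =>
    intro v stk cur
    simp only [List.cons_append, runB]
    match stepB stk cur c with
    | none => rfl
    | some (s', cur') => exact ih v s' cur'

-- ----- frame: a run that starts and ends on the empty stack can be replayed on top
-- ----- of any stack, adding its value to the ambient cur -----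

def FRel (stk : List (Int × Char)) (c0 : Int)
    (σ1 : List (Int × Char)) (x1 : Int) (σ2 : List (Int × Char)) (x2 : Int) : Prop :=
  (σ1 = [] ∧ σ2 = stk ∧ x2 = x1 + c0) ∨
  (∃ a b o, σ1 = a ++ [(b, o)] ∧ σ2 = a ++ (b + c0, o) :: stk ∧ x2 = x1)

theorem stepB_frel {stk : List (Int × Char)} {c0 : Int} {σ1 σ2 : List (Int × Char)}
    {x1 x2 : Int} {c : Char} {σ1' : List (Int × Char)} {x1' : Int}
    (hrel : FRel stk c0 σ1 x1 σ2 x2)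
    (hstep : stepB σ1 x1 c = some (σ1', x1')) :
    ∃ σ2' x2', stepB σ2 x2 c = some (σ2', x2') ∧ FRel stk c0 σ1' x1' σ2' x2' := by
  by_cases h1 : c = '(' ∨ c = '['
  · simp only [stepB, h1, if_true, Option.some.injEq, Prod.mk.injEq] at hstep
    obtain ⟨hσ, hx⟩ := hstep
    subst hσ; subst hx
    rcases hrel with ⟨he, hs, hc⟩ | ⟨a, b, o, ha, hs, hc⟩
    · exact ⟨(x2, c) :: σ2, 0, by simp [stepB, h1],
        Or.inr ⟨[], x1, c, by simp [he], by simp [hs, hc], rfl⟩⟩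
    · exact ⟨(x2, c) :: σ2, 0, by simp [stepB, h1],
        Or.inr ⟨(x1, c) :: a, b, o, by simp [ha], by simp [hs, hc], rfl⟩⟩
  · by_cases h2 : c = ')' ∨ c = ']'
    · match σ1, hrel, hstep with
      | [], hrel, hstep => simp [stepB, h1, h2] at hstep
      | (saved, o) :: s, hrel, hstep =>
        simp only [stepB, h1, h2, if_false, if_true] at hstep
        by_cases h3 : (o = '(' ↔ c = ')')
        · simp only [h3, if_true, Option.some.injEq, Prod.mk.injEq] at hstep
          obtain ⟨hσ, hx⟩ := hstep
          subst hσ; subst hx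
          rcases hrel with ⟨he, _, _⟩ | ⟨a, b, o', ha, hs, hc⟩
          · exact absurd he (by simp)
          · match a, ha with
            | [], ha =>
              simp only [List.nil_append, List.cons.injEq, Prod.mk.injEq] at ha
              obtain ⟨⟨hb, ho⟩, hsnil⟩ := ha
              refine ⟨stk, (b + c0) + (if x2 = 0 then 1 else x2) * (if c = ')' then 2 else 3),
                ?_, Or.inl ⟨hsnil, rfl, by rw [hc, hb]; ring⟩⟩
              rw [hs]
              simp only [List.nil_append, stepB, h1, h2, if_false, if_true]
              rw [if_pos (ho ▸ h3)]
            | (b2, o2) :: a', ha =>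
              simp only [List.cons_append, List.cons.injEq, Prod.mk.injEq] at ha
              obtain ⟨⟨hb2, ho2⟩, ha'⟩ := ha
              refine ⟨a' ++ (b + c0, o') :: stk,
                b2 + (if x2 = 0 then 1 else x2) * (if c = ')' then 2 else 3),
                ?_, Or.inr ⟨a', b, o', ha', rfl, by rw [hc, hb2]⟩⟩
              rw [hs]
              simp only [List.cons_append, stepB, h1, h2, if_false, if_true]
              rw [if_pos (ho2 ▸ h3)]
        · simp [h3] at hstep
    · simp [stepB, h1, h2] at hstep

theorem runB_frel (v : List Char) : ∀ (stk : List (Int × Char)) (c0 : Int)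
    (σ1 σ2 : List (Int × Char)) (x1 x2 : Int) (σf : List (Int × Char)) (xf : Int),
    FRel stk c0 σ1 x1 σ2 x2 → runB v σ1 x1 = some (σf, xf) →
    ∃ σf' xf', runB v σ2 x2 = some (σf', xf') ∧ FRel stk c0 σf xf σf' xf' := by
  induction v with
  | nil =>
    intro stk c0 σ1 σ2 x1 x2 σf xf hrel hrun
    simp only [runB, Option.some.injEq, Prod.mk.injEq] at hrun
    exact ⟨σ2, x2, rfl, hrun.1 ▸ hrun.2 ▸ hrel⟩
  | cons c rest ih =>
    intro stk c0 σ1 σ2 x1 x2 σf xf hrel hrun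
    simp only [runB] at hrun ⊢
    match hst : stepB σ1 x1 c with
    | none => rw [hst] at hrun; exact absurd hrun (by simp)
    | some (s1', c1') =>
      rw [hst] at hrun
      obtain ⟨σ2', x2', hst2, hrel'⟩ := stepB_frel hrel hst
      rw [hst2]
      exact ih stk c0 s1' σ2' c1' x2' σf xf hrel' hrun

theorem runB_frame {v : List Char} {t : Int} (h : runB v [] 0 = some ([], t))
    (stk : List (Int × Char)) (c0 : Int) : runB v stk c0 = some (stk, c0 + t) := by
  obtain ⟨σf', xf', hrun, hrel⟩ :=
    runB_frel v stk c0 [] stk 0 c0 [] t (Or.inl ⟨rfl, rfl, by ring⟩) h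
  rcases hrel with ⟨_, hs, hx⟩ | ⟨a, b, o, ha, _, _⟩
  · rw [hrun, hs, hx]; ring_nf
  · simp at ha

-- ----- positivity: a nonempty complete run has value ≥ 2 -----

def GoodSt (σ : List (Int × Char)) (x : Int) : Prop :=
  0 ≤ x ∧ ∀ p ∈ σ, 0 ≤ p.1

theorem stepB_good {σ : List (Int × Char)} {x : Int} {c : Char}
    {σ' : List (Int × Char)} {x' : Int}
    (hg : GoodSt σ x) (hs : stepB σ x c = some (σ', x')) : GoodSt σ' x' := by
  obtain ⟨hx, hσ⟩ := hg
  by_cases h1 : c = '(' ∨ c = '['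
  · simp only [stepB, h1, if_true, Option.some.injEq, Prod.mk.injEq] at hs
    obtain ⟨h2, h3⟩ := hs
    constructor
    · omega
    · intro p hp
      rw [← h2, List.mem_cons] at hp
      rcases hp with rfl | hp
      · exact hx
      · exact hσ p hp
  · by_cases h2 : c = ')' ∨ c = ']'
    · match σ with
      | [] => simp [stepB, h1, h2] at hs
      | (saved, o) :: s =>
        simp only [stepB, h1, h2, if_false, if_true] at hs
        by_cases h3 : (o = '(' ↔ c = ')')
        · simp only [h3, if_true, Option.some.injEq, Prod.mk.injEq] at hs
          obtain ⟨h4, h5⟩ := hs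
          have hsaved : (0:Int) ≤ saved := hσ (saved, o) (by simp)
          constructor
          · rw [← h5]
            have h6 : (1:Int) ≤ (if x = 0 then 1 else x) := by split <;> omega
            have h7 : (2:Int) ≤ (if c = ')' then 2 else 3) := by split <;> omega
            nlinarith
          · intro p hp; exact hσ p (by rw [← h4] at hp; simp [hp])
        · simp [h3] at hs
    · simp [stepB, h1, h2] at hs

theorem runB_good (v : List Char) : ∀ (σ : List (Int × Char)) (x : Int)
    (σ' : List (Int × Char)) (x' : Int),
    GoodSt σ x → runB v σ x = some (σ', x') → GoodSt σ' x' := by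
  induction v with
  | nil =>
    intro σ x σ' x' hg hr
    simp only [runB, Option.some.injEq, Prod.mk.injEq] at hr
    exact hr.1 ▸ hr.2 ▸ hg
  | cons c rest ih =>
    intro σ x σ' x' hg hr
    simp only [runB] at hr
    match hst : stepB σ x c with
    | none => rw [hst] at hr; exact absurd hr (by simp)
    | some (s1, c1) =>
      rw [hst] at hr
      exact ih s1 c1 σ' x' (stepB_good hg hst) hr

theorem runB_pos {v : List Char} {t : Int}
    (h : runB v [] 0 = some ([], t)) (hne : v ≠ []) : 2 ≤ t := by
  obtain ⟨v', c, hvc⟩ := (List.eq_nil_or_concat v).resolve_left hne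
  rw [List.concat_eq_append] at hvc
  subst hvc
  rw [runB_append] at h
  match hm : runB v' [] 0 with
  | none => rw [hm] at h; exact absurd h (by simp)
  | some (σm, xm) =>
    rw [hm] at h
    have hgood : GoodSt σm xm :=
      runB_good v' [] 0 σm xm ⟨le_refl 0, by simp⟩ hm
    simp only [runB] at h
    match hst : stepB σm xm c with
    | none => rw [hst] at h; exact absurd h (by simp)
    | some (s1, c1) =>
      rw [hst] at h
      simp only [Option.some.injEq, Prod.mk.injEq] at h
      obtain ⟨hs1, hc1⟩ := h
      subst hs1; subst hc1
      -- the last step produced the empty stack: it must be a matched close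
      by_cases h1 : c = '(' ∨ c = '['
      · simp only [stepB, h1, if_true, Option.some.injEq, Prod.mk.injEq] at hst
        exact absurd hst.1.symm (by simp)
      · by_cases h2 : c = ')' ∨ c = ']'
        · match σm with
          | [] => simp [stepB, h1, h2] at hst
          | (saved, o) :: s =>
            simp only [stepB, h1, h2, if_false, if_true] at hst
            by_cases h3 : (o = '(' ↔ c = ')')
            · simp only [h3, if_true, Option.some.injEq, Prod.mk.injEq] at hst
              obtain ⟨hσ, hx⟩ := hst
              have hsaved : (0:Int) ≤ saved := hgood.2 (saved, o) (by simp)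
              have hxm : (0:Int) ≤ xm := hgood.1
              rw [← hx]
              have h6 : (1:Int) ≤ (if xm = 0 then 1 else xm) := by split <;> omega
              have h7 : (2:Int) ≤ (if c = ')' then 2 else 3) := by split <;> omega
              nlinarith
            · simp [h3] at hst
        · simp [stepB, h1, h2] at hst

-- ----- A's loop returns 0 once a non-opener is stuck on its stack -----

theorem goA_doomed (F : List Char → Int) (rest : List Char) :
    ∀ (ans : Int) (sub stk : List Char) (x : Char),
    x ∈ stk → ¬(x = '(' ∨ x = '[') → goA F rest ans sub stk = 0 := by
  induction rest with
  | nil =>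
    intro ans sub stk x hx hbad
    have : stk ≠ [] := List.ne_nil_of_mem hx
    simp [goA, this]
  | cons i r ih =>
    intro ans sub stk x hx hbad
    match stk with
    | [] => exact absurd hx (by simp)
    | t :: s =>
      simp only [goA]
      by_cases hpop : dicGet t = some i
      · have ht : t = '(' ∨ t = '[' := by
          by_contra h
          simp only [dicGet] at hpop
          rw [not_or] at h
          simp [h.1, h.2] at hpop
        have hxs : x ∈ s := by
          rcases List.mem_cons.mp hx with h | h
          · exact absurd (h ▸ ht) hbad
          · exact h
        have hsne : s ≠ [] := List.ne_nil_of_mem hxs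
        simp only [hpop, if_true, hsne, if_false]
        exact ih ans (sub ++ [i]) s x hxs hbad
      · simp only [hpop, if_false]
        have : (i :: t :: s) ≠ ([] : List Char) := by simp
        simp only [this, if_false]
        exact ih ans (sub ++ [i]) (i :: t :: s) x (by simp [List.mem_cons.mp hx]) hbad

-- ----- the simulation invariant: A's (sub, stk) against B's (stk, cur) -----

def Decomp : List Char → List (Int × Char) → Int → Int → Prop
  | sub, [], cur, ans => sub = [] ∧ cur = ans
  | sub, (s, o) :: below, cur, ans =>
      ∃ pre g, (o = '(' ∨ o = '[') ∧ sub = pre ++ o :: g ∧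
        runB g [] 0 = some ([], cur) ∧ Decomp pre below s ans

theorem gen (F : List Char → Int) (L : Nat)
    (hF1 : F [] = 1)
    (hF : ∀ v, v ≠ [] → v.length < L → F v = goB v [] 0) :
    ∀ (rest sub : List Char) (stkB : List (Int × Char)) (cur ans : Int),
    Decomp sub stkB cur ans → sub.length + rest.length ≤ L →
    goA F rest ans sub (stkB.map Prod.snd) = goB rest stkB cur := by
  intro rest
  induction rest with
  | nil =>
    intro sub stkB cur ans hdec _
    match stkB with
    | [] => simpa [goA, goB] using hdec.2.symm
    | (s, o) :: below => simp [goA, goB]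
  | cons c rest' ih =>
    intro sub stkB cur ans hdec hlen
    match stkB with
    | [] =>
      obtain ⟨hsub, hcur⟩ := hdec
      subst hsub; subst hcur
      have hA : goA F (c :: rest') cur [] (([] : List (Int × Char)).map Prod.snd) =
          goA F rest' cur [c] [c] := by
        have hne : ¬([c] = ([] : List Char)) := by simp
        simp [goA, hne]
      rw [hA]
      by_cases h1 : c = '(' ∨ c = '['
      · have hB : goB (c :: rest') [] cur = goB rest' [(cur, c)] 0 := by simp [goB, h1]
        rw [hB]
        have := ih [c] [(cur, c)] 0 cur
          ⟨[], [], h1, by simp, rfl, rfl, rfl⟩ (by simp at hlen ⊢; omega)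
        simpa using this
      · have hB : goB (c :: rest') [] cur = 0 := by
          by_cases h2 : c = ')' ∨ c = ']' <;> simp [goB, h1, h2]
        rw [hB]
        exact goA_doomed F rest' cur [c] [c] c (by simp) h1
    | (s, o) :: below =>
      obtain ⟨pre, g, ho, hsub, hg, hdec'⟩ := hdec
      simp only [List.map_cons, goA]
      by_cases hpop : dicGet o = some c
      · -- matched close: A pops (and may finish a top-level group), B pops
        have hmatch : (o = '(' ∧ c = ')') ∨ (o = '[' ∧ c = ']') := by
          rcases ho with h | h
          · subst h
            have h2 : ')' = c := by simpa [dicGet] using hpop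
            exact Or.inl ⟨rfl, h2.symm⟩
          · subst h
            have h2 : ']' = c := by simpa [dicGet] using hpop
            exact Or.inr ⟨rfl, h2.symm⟩
        have hc2 : ¬(c = '(' ∨ c = '[') := by rcases hmatch with ⟨_, h⟩ | ⟨_, h⟩ <;> simp [h]
        have hc3 : c = ')' ∨ c = ']' := by rcases hmatch with ⟨_, h⟩ | ⟨_, h⟩ <;> simp [h]
        have hiff : (o = '(' ↔ c = ')') := by
          rcases hmatch with ⟨h1, h2⟩ | ⟨h1, h2⟩ <;> simp [h1, h2]
        -- F applied to the inner content g equals B's (cur if cur else 1)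
        have hFg : F g = (if cur = 0 then 1 else cur) := by
          by_cases hgnil : g = []
          · subst hgnil
            have hcur0 : cur = 0 := by
              simp only [runB, Option.some.injEq, Prod.mk.injEq, true_and] at hg
              omega
            rw [hF1, hcur0]
            simp
          · have hglen : g.length < L := by
              have hl := congrArg List.length hsub
              simp at hl
              simp at hlen
              omega
            have h2 : (2:Int) ≤ cur := runB_pos hg hgnil
            rw [hF g hgnil hglen, goB_eq_runB, hg]
            simp
            omega
        simp only [hpop, if_true]
        match below with
        | [] =>
          -- closing the outermost open bracket: A finishes a group and resets sub
          obtain ⟨hpre, hs⟩ : pre = [] ∧ s = ans := hdec'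
          subst hpre; subst hs
          rw [List.nil_append] at hsub
          subst hsub
          simp only [List.map_nil, if_true]
          have hinner2 : (((o :: g) ++ [c]).drop 1).dropLast = g := by simp
          have hhead : ((o :: g) ++ [c]).head? = some o := by simp
          rw [hinner2, hhead]
          have hmul : (if some o = some '(' then (2:Int) else 3) = (if c = ')' then 2 else 3) := by
            rcases hmatch with ⟨h1, h2⟩ | ⟨h1, h2⟩ <;> simp [h1, h2]
          simp only [goB, hc2, if_false, hc3, if_true, hiff]
          rw [hFg, hmul]
          exact ih [] [] (s + (if cur = 0 then 1 else cur) * (if c = ')' then 2 else 3))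
            (s + (if cur = 0 then 1 else cur) * (if c = ')' then 2 else 3))
            ⟨rfl, rfl⟩ (by simp at hlen ⊢; omega)
        | (s2, o2) :: below2 =>
          obtain ⟨pre2, g2, ho2, hpre, hg2, hdec2⟩ := hdec'
          have hmapne : ((s2, o2) :: below2).map Prod.snd ≠ [] := by simp
          simp only [hmapne, if_false]
          simp only [goB, hc2, if_false, hc3, if_true, hiff, if_true]
          -- new completed content at the enclosing level: g2 ++ [o] ++ g ++ [c]
          have hrun1 : runB (g2 ++ [o]) [] 0 = some ([(s, o)], 0) := by
            rw [runB_append, hg2]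
            rcases ho with h | h <;> subst h <;> simp [runB, stepB]
          have hrun2 : runB (g2 ++ [o] ++ g) [] 0 = some ([(s, o)], cur) := by
            rw [runB_append, hrun1]
            show runB g [(s, o)] 0 = some ([(s, o)], cur)
            simpa using runB_frame hg [(s, o)] 0
          have hval : runB (g2 ++ [o] ++ g ++ [c]) [] 0 =
              some ([], s + (if cur = 0 then 1 else cur) * (if c = ')' then 2 else 3)) := by
            rw [runB_append, hrun2]
            show runB [c] [(s, o)] cur = _
            simp [runB, stepB, hc2, hc3, hiff]
          have := ih (sub ++ [c]) ((s2, o2) :: below2)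
            (s + (if cur = 0 then 1 else cur) * (if c = ')' then 2 else 3)) ans
            ⟨pre2, g2 ++ [o] ++ g ++ [c], ho2, by rw [hsub, hpre]; simp, hval, hdec2⟩
            (by simp at hlen ⊢; omega)
          simpa using this
      · -- no pop: A pushes c
        simp only [hpop, if_false]
        have hne : (c :: o :: below.map Prod.snd) ≠ [] := by simp
        simp only [hne, if_false]
        by_cases h1 : c = '(' ∨ c = '['
        · -- c is an opener: B pushes (cur, c)
          simp only [goB, h1, if_true]
          have := ih (sub ++ [c]) ((cur, c) :: (s, o) :: below) 0 ans
            ⟨sub, [], h1, by simp, rfl, pre, g, ho, hsub, hg, hdec'⟩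
            (by simp at hlen ⊢; omega)
          simpa using this
        · -- c is a mismatched closer or a foreign character: both sides give 0
          have hz : goB (c :: rest') ((s, o) :: below) cur = 0 := by
            by_cases h2 : c = ')' ∨ c = ']'
            · have hiff : ¬(o = '(' ↔ c = ')') := by
                intro hiff
                apply hpop
                simp only [dicGet]
                rcases ho with h | h
                · simp [h, hiff.mp h]
                · have hne1 : o ≠ '(' := by rw [h]; decide
                  have hc : c = ']' := by
                    rcases h2 with h2 | h2
                    · exact absurd (hiff.mpr h2) hne1
                    · exact h2
                  simp [h, hc]
              simp [goB, h1, h2, hiff]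
            · simp [goB, h1, h2]
          rw [hz]
          exact goA_doomed F rest' ans (sub ++ [c]) (c :: o :: below.map Prod.snd) c
            (by simp) h1

theorem fA_correct : ∀ (N : Nat) (l : List Char), l.length < N → l ≠ [] →
    fA N l = goB l [] 0 := by
  intro N
  induction N with
  | zero => intro l h; omega
  | succ n ih =>
    intro l hlen hne
    simp only [fA, hne, if_false]
    have hn1 : 1 ≤ n := by
      have : 0 < l.length := List.length_pos_of_ne_nil hne
      omega
    have hF1 : fA n [] = 1 := by
      match n, hn1 with
      | m + 1, _ => simp [fA]
    have hF : ∀ v : List Char, v ≠ [] → v.length < l.length → fA n v = goB v [] 0 := by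
      intro v hvne hvlen
      exact ih v (by omega) hvne
    have := gen (fA n) l.length hF1 hF l [] [] 0 0 ⟨rfl, rfl⟩ (by simp)
    simpa using this

theorem toList_ne_nil_of_ne_empty {p : String} (h : p ≠ "") : p.toList ≠ [] := by
  intro hnil
  apply h
  have : p.toList = ("" : String).toList := by simpa using hnil
  exact String.toList_inj.mp (by simpa using this)

-- ===== VERDICT (by name: the statement is the Claim_ definition above) =====
theorem f_spec : Claim_unchanged_f := by
  intro p _ hD
  have hne : p.toList ≠ [] := toList_ne_nil_of_ne_empty hD
  unfold f f_alt
  exact fA_correct (p.toList.length + 1) p.toList (by omega) hne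

theorem f_changed : Claim_changed_f := by unfold Claim_changed_f; decide

theorem f_tight : Claim_exact_f := by
  intro p _ hD
  unfold D_f at hD
  subst hD
  decide
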